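-- pv_equiv track=rewrite | github.com/krangelov/rgl-learner | rgl_learner/learn_paradigms.py | count_infixes
-- ===== SOURCE A (Python) =====
-- def count_infixes(string):
--     """Counts total number of separate infix occurrences."""
--     totalinfixes = 0
--     infix = 0
--     runninginfixcount = 0
--     totalinfixes = 0
--     for idx, val in enumerate(string):
--         if val == u'[':
--             infix = 0
--             totalinfixes += runninginfixcount
--             runninginfixcount = 0
--         elif val != u']' and infix:
--             runninginfixcount += 1
--         elif val == u']':
--             infix = 1
--     return totalinfixes
-- ===== SOURCE B (Python) =====
-- def count_infixes(string):
--     """Counts total number of separate infix occurrences."""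
--     total = 0
--     for block in string.split('[')[:-1]:
--         pos = block.find(']')
--         if pos != -1:
--             total += sum(1 for c in block[pos + 1:] if c != ']')
--     return total
-- ===== Notes on version B (the rewrite author's own statement) =====
-- stated objective: simpler
-- what changed: Replaced the per-character bracket state machine (infix flag + running counter flushed at each '[') by a segment pass: split the string on '[', drop the never-flushed last segment, and for each remaining segment count the non-']' characters after its first ']'.
import Mathlib
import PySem

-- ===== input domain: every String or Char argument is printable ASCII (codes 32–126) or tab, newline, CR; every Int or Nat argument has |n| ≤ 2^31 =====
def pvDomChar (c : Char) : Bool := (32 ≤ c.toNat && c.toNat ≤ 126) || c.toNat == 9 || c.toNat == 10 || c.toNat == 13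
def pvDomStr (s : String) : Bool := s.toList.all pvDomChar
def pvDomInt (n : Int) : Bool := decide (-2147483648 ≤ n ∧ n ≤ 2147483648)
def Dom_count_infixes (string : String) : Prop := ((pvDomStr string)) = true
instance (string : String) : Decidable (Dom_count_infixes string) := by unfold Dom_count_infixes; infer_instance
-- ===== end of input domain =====

-- B replaces A's per-character bracket state machine by a segment pass: split on '[',
-- drop the never-flushed last segment, and count the non-']' characters after the first ']'
-- of each remaining segment (objective: simpler).

-- ===== PORT A =====
-- state = (totalinfixes, infix, runninginfixcount), exactly A's loop body
def pvStepA (s : Int × Int × Int) (c : Char) : Int × Int × Int :=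
  if c = '[' then (s.1 + s.2.2, 0, 0)
  else if c ≠ ']' ∧ s.2.1 ≠ 0 then (s.1, s.2.1, s.2.2 + 1)
  else if c = ']' then (s.1, 1, s.2.2)
  else s

def count_infixes (string : String) : Int :=
  (string.toList.foldl pvStepA (0, 0, 0)).1

-- ===== PORT B =====
-- loop body of Source B: pos = block.find(']'); if pos != -1: total += sum(1 for c in block[pos+1:] if c != ']')
def pvBlockStep (total : Int) (block : List Char) : Int :=
  let pos := PySem.Chars.find block [']']
  if pos ≠ -1 then
    total + (((PySem.List.slice block (some (pos + 1)) none).countP (fun c => decide (c ≠ ']')) : Nat) : Int)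
  else total

def count_infixes_alt (string : String) : Int :=
  ((PySem.Chars.splitOn string.toList ['[']).dropLast).foldl pvBlockStep 0

-- ===== PRECONDITION & SPEC =====
def Spec_count_infixes (string : String) (out : Int) : Prop := out = count_infixes_alt string
instance (string : String) (out : Int) : Decidable (Spec_count_infixes string out) := by unfold Spec_count_infixes; infer_instance

-- ===== CLAIM (what is proved, stated in full; the proofs are below) =====
def Claim_equal_count_infixes : Prop := ∀ (string : String), Dom_count_infixes string → Spec_count_infixes string (count_infixes string)

-- ===== LEMMAS AND PROOFS =====

-- chars counted in the rest of the string given state (infix, running); mirrors pvStepA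
def pvSpill (inf r : Int) : List Char → Int
  | [] => 0
  | c :: cs =>
    if c = '[' then r + pvSpill 0 0 cs
    else if c ≠ ']' ∧ inf ≠ 0 then pvSpill inf (r + 1) cs
    else if c = ']' then pvSpill 1 r cs
    else pvSpill inf r cs

-- reference split on '['
def pvSplit : List Char → List (List Char)
  | [] => [[]]
  | c :: cs => if c = '[' then [] :: pvSplit cs else (pvSplit cs).modifyHead (c :: ·)

def pvCountNonR (s : List Char) : Int := ((s.countP (fun c => decide (c ≠ ']')) : Nat) : Int)

-- chars counted inside one segment starting from infix = 0
def pvSeg : List Char → Int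
  | [] => 0
  | c :: cs => if c = ']' then pvCountNonR cs else pvSeg cs

def pvGCount (inf : Int) (s : List Char) : Int := if inf = 0 then pvSeg s else pvCountNonR s

lemma pvSplit_ne_nil (cs : List Char) : pvSplit cs ≠ [] := by
  induction cs with
  | nil => simp [pvSplit]
  | cons c cs ih =>
    by_cases hc : c = '['
    · simp [pvSplit, hc]
    · simp only [pvSplit, if_neg hc]
      rcases e : pvSplit cs with _ | ⟨h, t⟩
      · exact absurd e ih
      · simp

lemma pvFoldA (cs : List Char) : ∀ t inf r,
    (cs.foldl pvStepA (t, inf, r)).1 = t + pvSpill inf r cs := by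
  induction cs with
  | nil => intro t inf r; simp [pvSpill]
  | cons c cs ih =>
    intro t inf r
    simp only [List.foldl_cons, pvStepA, pvSpill]
    split_ifs with h1 h2 h3 <;> simp [ih] <;> ring

lemma pvSpill_eq (cs : List Char) : ∀ inf r,
    pvSpill inf r cs =
      (if (pvSplit cs).tail = [] then 0 else r + pvGCount inf (pvSplit cs).headI)
      + (((pvSplit cs).tail.dropLast).map pvSeg).sum := by
  induction cs with
  | nil => intro inf r; simp [pvSpill, pvSplit]
  | cons c cs ih =>
    intro inf r
    rcases e : pvSplit cs with _ | ⟨h, tl⟩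
    · exact absurd e (pvSplit_ne_nil _)
    by_cases hc : c = '['
    · simp only [pvSpill, if_pos hc, pvSplit, e, List.tail_cons, List.headI_cons]
      rw [ih 0 0]
      rw [e]
      cases tl with
      | nil => simp [pvGCount, pvSeg, pvCountNonR]
      | cons x xs =>
        simp only [List.tail_cons, List.dropLast_cons₂, List.map_cons, List.sum_cons]
        simp [pvGCount, pvSeg, pvCountNonR]
        try ring
    · have hsplit : pvSplit (c :: cs) = (c :: h) :: tl := by
        simp [pvSplit, if_neg hc, e]
      by_cases hr : c = ']'
      · subst hr
        simp only [pvSpill]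
        rw [if_neg hc, if_neg (by simp : ¬((']' : Char) ≠ ']' ∧ inf ≠ 0)), if_pos trivial]
        rw [ih 1 r, e, hsplit]
        simp only [List.tail_cons, List.headI_cons]
        congr 1
        split_ifs with h1
        · rfl
        · have h2 : pvGCount inf (']' :: h) = pvCountNonR h := by
            unfold pvGCount pvSeg pvCountNonR
            split_ifs <;> simp_all
          rw [h2]
          simp [pvGCount]
      · by_cases hi : inf = 0
        · simp only [pvSpill, if_neg hc, if_neg (by simp [hr, hi] : ¬(c ≠ ']' ∧ inf ≠ 0)), if_neg hr]
          rw [ih inf r, e, hsplit]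
          simp only [List.tail_cons, List.headI_cons]
          congr 2
          simp [pvGCount, hi, pvSeg, hr]
        · simp only [pvSpill, if_neg hc, if_pos (⟨hr, hi⟩ : c ≠ ']' ∧ inf ≠ 0)]
          rw [ih inf (r+1), e, hsplit]
          simp only [List.tail_cons, List.headI_cons]
          congr 1
          split_ifs with h1
          · rfl
          · have : pvGCount inf (c :: h) = 1 + pvCountNonR h := by
              simp only [pvGCount, if_neg hi]
              unfold pvCountNonR
              simp [hr]
              ring
            rw [this]
            simp only [pvGCount, if_neg hi]
            ring

lemma pvSeg_no (p : List Char) (hp : ']' ∉ p) : pvSeg p = 0 := by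
  induction p with
  | nil => rfl
  | cons c cs ih =>
    simp only [List.mem_cons, not_or] at hp
    simp only [pvSeg, if_neg (Ne.symm hp.1)]
    exact ih hp.2

lemma pvSeg_yes (p t : List Char) (hp : ']' ∉ p) : pvSeg (p ++ ']' :: t) = pvCountNonR t := by
  induction p with
  | nil => simp [pvSeg]
  | cons c cs ih =>
    simp only [List.mem_cons, not_or] at hp
    simp only [List.cons_append, pvSeg, if_neg (Ne.symm hp.1)]
    exact ih hp.2

-- the per-block contribution of Source B's loop body
def pvBlockVal (block : List Char) : Int :=
  let pos := PySem.Chars.find block [']']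
  if pos ≠ -1 then
    (((PySem.List.slice block (some (pos + 1)) none).countP (fun c => decide (c ≠ ']')) : Nat) : Int)
  else 0

lemma pvBlockVal_no (p : List Char) (hp : ']' ∉ p) : pvBlockVal p = 0 := by
  have : PySem.Chars.find p [']'] = -1 := by
    rw [PySem.Chars.find_eq_neg_one_iff]
    rw [List.singleton_infix_iff]
    exact hp
  simp [pvBlockVal, this]

lemma pvBlockVal_yes (p t : List Char) (hp : ']' ∉ p) :
    pvBlockVal (p ++ ']' :: t) = pvCountNonR t := by
  have hmem : (']' : Char) ∈ p ++ ']' :: t := by simp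
  have hnn : 0 ≤ PySem.Chars.find (p ++ ']' :: t) [']'] := by
    rw [PySem.Chars.find_nonneg_iff, List.singleton_infix_iff]; exact hmem
  obtain ⟨h1, h2⟩ := PySem.Chars.find_spec hnn
  set n := (PySem.Chars.find (p ++ ']' :: t) [']']).toNat with hn
  have hpre : ∀ k, [(']' : Char)] <+: (p ++ ']' :: t).drop k ↔ (p ++ ']' :: t)[k]? = some ']' := by
    intro k
    rw [show ∀ l : List Char, ([(']' : Char)] <+: l ↔ l.head? = some ']') from ?_, List.head?_drop]
    intro l; cases l <;> simp [List.prefix_cons_iff, eq_comm]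
  have hnp : n = p.length := by
    rcases lt_trichotomy n p.length with h | h | h
    · exfalso
      rw [hpre] at h1
      rw [List.getElem?_append_left h] at h1
      exact hp (List.mem_of_getElem? h1)
    · exact h
    · exfalso
      apply h2 p.length h
      rw [hpre]
      simp
  have hfind : PySem.Chars.find (p ++ ']' :: t) [']'] = (p.length : Int) := by
    omega
  have hslice : PySem.List.slice (p ++ ']' :: t) (some ((p.length : Int) + 1)) none = t := by
    rw [PySem.List.slice_from _ (by positivity)]
    have : ((p.length : Int) + 1).toNat = (p ++ [']']).length := by simp
    rw [this, show p ++ ']' :: t = (p ++ [']']) ++ t by simp, List.drop_left]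
  simp only [pvBlockVal, hfind, hslice]
  rw [if_pos (by omega)]
  rfl

lemma pvFirstR (s : List Char) : ']' ∉ s ∨ ∃ p t, s = p ++ ']' :: t ∧ ']' ∉ p := by
  induction s with
  | nil => left; simp
  | cons c cs ih =>
    by_cases hc : c = ']'
    · right; exact ⟨[], cs, by simp [hc], by simp⟩
    · rcases ih with h | ⟨p, t, e, hp⟩
      · left; simp [Ne.symm hc, h]
      · right; exact ⟨c :: p, t, by simp [e], by simp [Ne.symm hc, hp]⟩

lemma pvBlockVal_eq_pvSeg (s : List Char) : pvBlockVal s = pvSeg s := by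
  rcases pvFirstR s with h | ⟨p, t, rfl, hp⟩
  · rw [pvBlockVal_no s h, pvSeg_no s h]
  · rw [pvBlockVal_yes p t hp, pvSeg_yes p t hp]

lemma pvFoldB (l : List (List Char)) (a : Int) :
    l.foldl pvBlockStep a = a + (l.map pvSeg).sum := by
  have hb : pvBlockStep = fun t b => t + pvBlockVal b := by
    funext t b
    simp only [pvBlockStep, pvBlockVal]
    split_ifs <;> simp
  rw [hb, PySem.List.foldl_add]
  congr 1
  exact congrArg _ (List.map_congr_left fun b _ => pvBlockVal_eq_pvSeg b)

lemma pvSplitOn_go (cs : List Char) : ∀ fuel cur acc, cs.length < fuel →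
    PySem.Chars.splitOn.go ['['] fuel cs cur acc
      = acc.reverse ++ (pvSplit cs).modifyHead (cur.reverse ++ ·) := by
  induction cs with
  | nil =>
    intro fuel cur acc hf
    match fuel, hf with
    | fuel + 1, _ => simp [PySem.Chars.splitOn.go, pvSplit]
  | cons c cs ih =>
    intro fuel cur acc hf
    match fuel, hf with
    | fuel + 1, hf =>
      rcases e : pvSplit cs with _ | ⟨h, tl⟩
      · exact absurd e (pvSplit_ne_nil _)
      by_cases hc : c = '['
      · have hpref : List.isPrefixOf ['['] (c :: cs) = true := by simp [List.isPrefixOf, hc]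
        simp only [PySem.Chars.splitOn.go, hpref, if_true, List.length_cons,
          List.length_nil, List.drop_succ_cons, List.drop_zero]
        rw [ih fuel [] (cur.reverse :: acc) (by simpa using hf)]
        simp [pvSplit, hc, e]
      · have hpref : List.isPrefixOf ['['] (c :: cs) = false := by
          simp [List.isPrefixOf]; exact Ne.symm hc
        simp only [PySem.Chars.splitOn.go, hpref, Bool.false_eq_true, if_false]
        rw [ih fuel (c :: cur) acc (by simpa using hf)]
        simp [pvSplit, hc, e]

lemma pvSplitOn_eq (cs : List Char) : PySem.Chars.splitOn cs ['['] = pvSplit cs := by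
  unfold PySem.Chars.splitOn
  rw [pvSplitOn_go cs (cs.length + 1) [] [] (by omega)]
  rcases e : pvSplit cs with _ | ⟨h, tl⟩
  · exact absurd e (pvSplit_ne_nil _)
  · simp

-- ===== VERDICT (by name: the statement is the Claim_ definition above) =====
theorem count_infixes_spec : Claim_equal_count_infixes := by
  intro s _
  unfold Spec_count_infixes count_infixes count_infixes_alt
  rw [pvSplitOn_eq, pvFoldB, pvFoldA, pvSpill_eq]
  rcases e : pvSplit s.toList with _ | ⟨h, tl⟩
  · exact absurd e (pvSplit_ne_nil _)
  · cases tl <;> simp [pvGCount]
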